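-- pv_equiv track=rewrite | github.com/unavailable-2374/Pan_TE | bin/Refiner/phase2_chimera_splitting_improved.py | _find_optimal_breakpoint
-- ===== SOURCE A (Python) =====
-- def _find_optimal_breakpoint(gap_sequence: str, offset: int) -> int:
--     """在间隙中找到最优断点位置"""
--     # 简单实现：寻找最低复杂度的位置
--     if len(gap_sequence) < 10:
--         return offset + len(gap_sequence) // 2
--
--     min_complexity = float('inf')
--     best_pos = len(gap_sequence) // 2
--
--     window = 10
--     for i in range(window, len(gap_sequence) - window):
--         subseq = gap_sequence[i-window:i+window]
--         complexity = len(set(subseq))  # 简单的复杂度度量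
--         if complexity < min_complexity:
--             min_complexity = complexity
--             best_pos = i
--
--     return offset + best_pos
-- ===== SOURCE B (Python) =====
-- def _find_optimal_breakpoint(gap_sequence: str, offset: int) -> int:
--     """Sliding-window re-implementation: maintain a char-frequency dict and a
--     running distinct-count instead of rebuilding a set for every window."""
--     n = len(gap_sequence)
--     if n < 10:
--         return offset + n // 2
--
--     w = 10
--     counts = {}
--     distinct = 0
--     for ch in gap_sequence[:2 * w]:
--         c = counts.get(ch, 0)
--         counts[ch] = c + 1
--         if c == 0:
--             distinct += 1
--
--     best_pos = n // 2
--     min_complexity = None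
--     for i in range(w, n - w):
--         if min_complexity is None or distinct < min_complexity:
--             min_complexity = distinct
--             best_pos = i
--         # slide the window [i-w, i+w) one step to the right
--         ch = gap_sequence[i - w]
--         c = counts[ch] - 1
--         counts[ch] = c
--         if c == 0:
--             distinct -= 1
--         ch = gap_sequence[i + w]
--         c = counts.get(ch, 0)
--         counts[ch] = c + 1
--         if c == 0:
--             distinct += 1
--
--     return offset + best_pos
-- ===== Notes on version B (the rewrite author's own statement) =====
-- stated objective: faster
-- what changed: Replaces the per-position set-rebuild (len(set(subseq)) over a 20-char slice at every i) with an incrementally maintained sliding-window frequency dict and running distinct-count, updated in O(1) per position.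
import Mathlib
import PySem

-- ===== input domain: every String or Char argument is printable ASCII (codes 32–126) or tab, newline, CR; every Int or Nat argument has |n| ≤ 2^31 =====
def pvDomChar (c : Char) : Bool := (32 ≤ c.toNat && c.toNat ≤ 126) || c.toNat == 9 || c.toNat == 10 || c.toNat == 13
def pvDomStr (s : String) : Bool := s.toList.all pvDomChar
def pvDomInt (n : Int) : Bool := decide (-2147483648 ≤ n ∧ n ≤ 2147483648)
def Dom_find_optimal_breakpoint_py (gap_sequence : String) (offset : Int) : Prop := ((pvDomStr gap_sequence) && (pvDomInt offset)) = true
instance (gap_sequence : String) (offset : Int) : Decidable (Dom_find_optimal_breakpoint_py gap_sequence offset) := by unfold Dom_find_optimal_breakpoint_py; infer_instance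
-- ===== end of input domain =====

-- B replaces A's per-position set rebuild by a sliding-window frequency dict with a running
-- distinct-count (a timing run decides whether that is measurably faster here).

-- ===== PORT A =====
-- loop body of A's for-loop; min_complexity = float('inf') is modelled as `none` (always beaten)
def fobStepA (l : List Char) (st : Option Int × Int) (i : Int) : Option Int × Int :=
  let subseq := PySem.List.slice l (some (i - 10)) (some (i + 10))
  let complexity : Int := ((PySem.Set.ofList subseq).length : Int)
  match st.1 with
  | none => (some complexity, i)
  | some m => if complexity < m then (some complexity, i) else st

def find_optimal_breakpoint_py (gap_sequence : String) (offset : Int) : Int :=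
  let l := gap_sequence.toList
  let n : Int := (l.length : Int)
  if n < 10 then offset + PySem.Int.floordiv n 2
  else
    let st := (PySem.List.pyRange 10 (n - 10) 1).foldl (fobStepA l) (none, PySem.Int.floordiv n 2)
    offset + st.2

-- ===== PORT B =====
-- building counts/distinct over the first 2*w characters
def fobInit (p : PySem.Dict Char Int × Int) (ch : Char) : PySem.Dict Char Int × Int :=
  let c := p.1.getD ch 0
  (p.1.insert ch (c + 1), if c = 0 then p.2 + 1 else p.2)

-- loop body of B: compare, then slide the window one step right
def fobStepB (l : List Char) (st : PySem.Dict Char Int × Int × Option Int × Int) (i : Int) :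
    PySem.Dict Char Int × Int × Option Int × Int :=
  let counts := st.1
  let distinct := st.2.1
  let mb : Option Int × Int :=
    match st.2.2.1 with
    | none => (some distinct, i)
    | some m => if distinct < m then (some distinct, i) else (some m, st.2.2.2)
  let chOut := PySem.List.pyGetD l (i - 10) ' '
  let c1 := counts.getD chOut 0 - 1
  let counts1 := counts.insert chOut c1
  let d1 := if c1 = 0 then distinct - 1 else distinct
  let chIn := PySem.List.pyGetD l (i + 10) ' '
  let c2 := counts1.getD chIn 0
  let counts2 := counts1.insert chIn (c2 + 1)
  let d2 := if c2 = 0 then d1 + 1 else d1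
  (counts2, d2, mb.1, mb.2)

def find_optimal_breakpoint_py_alt (gap_sequence : String) (offset : Int) : Int :=
  let l := gap_sequence.toList
  let n : Int := (l.length : Int)
  if n < 10 then offset + PySem.Int.floordiv n 2
  else
    let init := (PySem.List.slice l none (some 20)).foldl fobInit (PySem.Dict.empty, 0)
    let st := (PySem.List.pyRange 10 (n - 10) 1).foldl (fobStepB l)
      (init.1, init.2, none, PySem.Int.floordiv n 2)
    offset + st.2.2.2

-- ===== PRECONDITION & SPEC =====
def Spec_find_optimal_breakpoint_py (gap_sequence : String) (offset : Int) (out : Int) : Prop := out = find_optimal_breakpoint_py_alt gap_sequence offset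
instance (gap_sequence : String) (offset : Int) (out : Int) : Decidable (Spec_find_optimal_breakpoint_py gap_sequence offset out) := by unfold Spec_find_optimal_breakpoint_py; infer_instance

-- ===== CLAIM (what is proved, stated in full; the proofs are below) =====
def Claim_equal_find_optimal_breakpoint_py : Prop := ∀ (gap_sequence : String) (offset : Int), Dom_find_optimal_breakpoint_py gap_sequence offset → Spec_find_optimal_breakpoint_py gap_sequence offset (find_optimal_breakpoint_py gap_sequence offset)

-- ===== LEMMAS AND PROOFS =====

-- number of distinct characters of a window, as A computes it
def fobND (ws : List Char) : Int := ((PySem.Set.ofList ws).length : Int)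

-- the sliding-window invariant: counts is the multiset of the window, distinct its distinct count
def fobInv (counts : PySem.Dict Char Int) (distinct : Int) (ws : List Char) : Prop :=
  (∀ ch, counts.getD ch 0 = (ws.count ch : Int)) ∧ distinct = fobND ws

theorem fobND_append (ws : List Char) (x : Char) :
    fobND (ws ++ [x]) = if x ∈ ws then fobND ws else fobND ws + 1 := by
  unfold fobND
  rw [PySem.Set.ofList_append_singleton]
  by_cases hx : x ∈ ws
  · rw [PySem.Set.add_of_mem ((PySem.Set.mem_ofList _ _).2 hx), if_pos hx]
  · rw [PySem.Set.add_of_not_mem (fun h => hx ((PySem.Set.mem_ofList _ _).1 h)), if_neg hx]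
    simp

theorem fobND_cons (a : Char) (t : List Char) :
    fobND (a :: t) = if a ∈ t then fobND t else fobND t + 1 := by
  have hp : (PySem.Set.ofList (a :: t)).Perm (PySem.Set.ofList (t ++ [a])) :=
    (List.perm_ext_iff_of_nodup (PySem.Set.nodup_ofList _) (PySem.Set.nodup_ofList _)).2
      (by intro y; simp [PySem.Set.mem_ofList, or_comm])
  have : fobND (a :: t) = fobND (t ++ [a]) := by
    unfold fobND; rw [hp.length_eq]
  rw [this, fobND_append]

theorem fobInv_add {counts distinct ws} (h : fobInv counts distinct ws) (x : Char) :
    fobInv (counts.insert x (counts.getD x 0 + 1))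
      (if counts.getD x 0 = 0 then distinct + 1 else distinct) (ws ++ [x]) := by
  obtain ⟨hc, hd⟩ := h
  constructor
  · intro ch
    rw [PySem.Dict.getD_insert]
    by_cases hch : ch = x
    · subst hch
      simp [hc ch, List.count_append]
    · simp [if_neg hch, hc ch, List.count_append, Ne.symm hch]
  · by_cases hx : x ∈ ws
    · have hne : counts.getD x 0 ≠ 0 := by
        rw [hc x]
        have : 0 < ws.count x := List.count_pos_iff.2 hx
        omega
      simp [if_neg hne, hd, fobND_append, if_pos hx]
    · have h0 : counts.getD x 0 = 0 := by rw [hc x, List.count_eq_zero.2 hx]; rfl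
      simp [h0, hd, fobND_append, hx]

theorem fobInv_remove {counts distinct} {a : Char} {t : List Char}
    (h : fobInv counts distinct (a :: t)) :
    fobInv (counts.insert a (counts.getD a 0 - 1))
      (if counts.getD a 0 - 1 = 0 then distinct - 1 else distinct) t := by
  obtain ⟨hc, hd⟩ := h
  have ha : counts.getD a 0 = (t.count a : Int) + 1 := by
    rw [hc a]; simp [List.count_cons_self]
  constructor
  · intro ch
    rw [PySem.Dict.getD_insert]
    by_cases hch : ch = a
    · subst hch; rw [if_pos rfl, ha]; ring
    · simp [if_neg hch, hc ch, Ne.symm hch]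
  · by_cases ht : a ∈ t
    · have hne : counts.getD a 0 - 1 ≠ 0 := by
        have : 0 < t.count a := List.count_pos_iff.2 ht
        omega
      simp [if_neg hne, hd, fobND_cons, if_pos ht]
    · have h0 : counts.getD a 0 - 1 = 0 := by
        rw [ha, List.count_eq_zero.2 ht]; ring
      simp [h0, hd, fobND_cons, ht]

theorem fobInit_inv (p : List Char) :
    ∀ counts distinct ws, fobInv counts distinct ws →
      fobInv (p.foldl fobInit (counts, distinct)).1 (p.foldl fobInit (counts, distinct)).2
        (ws ++ p) := by
  induction p with
  | nil => intro counts distinct ws h; simpa using h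
  | cons x p ih =>
    intro counts distinct ws h
    have h2 := ih (counts.insert x (counts.getD x 0 + 1))
      (if counts.getD x 0 = 0 then distinct + 1 else distinct) (ws ++ [x]) (fobInv_add h x)
    have e : fobInit (counts, distinct) x =
        (counts.insert x (counts.getD x 0 + 1),
         if counts.getD x 0 = 0 then distinct + 1 else distinct) := rfl
    simp only [List.foldl_cons, e]
    simpa [List.append_assoc] using h2

theorem fob_main (l : List Char) (m : Nat) :
    ∀ (i : Int), 10 ≤ i → i + m = (l.length : Int) - 10 →
    ∀ counts distinct, fobInv counts distinct ((l.drop (i - 10).toNat).take 20) →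
    ∀ (mb : Option Int) (best : Int),
      (((PySem.List.pyRange i ((l.length : Int) - 10) 1).foldl (fobStepB l)
          (counts, distinct, mb, best)).2.2.1,
       ((PySem.List.pyRange i ((l.length : Int) - 10) 1).foldl (fobStepB l)
          (counts, distinct, mb, best)).2.2.2) =
      (PySem.List.pyRange i ((l.length : Int) - 10) 1).foldl (fobStepA l) (mb, best) := by
  induction m with
  | zero =>
    intro i hi hm counts distinct h mb best
    rw [PySem.List.pyRange_one_eq_nil (by omega)]
    simp
  | succ m ih =>
    intro i hi hm counts distinct h mb best
    have hlt : i < (l.length : Int) - 10 := by omega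
    set j := (i - 10).toNat with hjdef
    have hjlt : j < l.length := by omega
    have hj20 : j + 20 < l.length := by omega
    have hdecomp1 : (l.drop j).take 20 = l[j] :: (l.drop (j+1)).take 19 := by
      rw [List.drop_eq_getElem_cons hjlt, show (20:Nat) = 19+1 from rfl, List.take_succ_cons]
    have hdecomp2 : (l.drop (j+1)).take 20 = (l.drop (j+1)).take 19 ++ [l[j+20]] := by
      have h19 : (l.drop (j+1))[19]? = some l[j+20] := by
        rw [List.getElem?_drop, List.getElem?_eq_getElem (by omega)]
      conv_lhs => rw [show (20:Nat) = 19+1 from rfl, List.take_add_one]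
      rw [h19]
      rfl
    have hwsA : PySem.List.slice l (some (i-10)) (some (i+10)) = (l.drop j).take 20 := by
      rw [PySem.List.slice_toNat l (by omega) (by omega)]
      rw [show ((i+10).toNat - (i-10).toNat) = 20 by omega]
    have hchOut : PySem.List.pyGetD l (i - 10) ' ' = l[j] := by
      rw [PySem.List.pyGetD_eq_getElem l ' ' (by omega) (by omega)]
    have hchIn : PySem.List.pyGetD l (i + 10) ' ' = l[j+20] := by
      rw [PySem.List.pyGetD_eq_getElem l ' ' (by omega) (by omega)]
      simp only [show (i+10).toNat = j+20 by omega]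
    have hcpx : ((PySem.Set.ofList (PySem.List.slice l (some (i-10)) (some (i+10)))).length : Int)
        = distinct := by
      rw [hwsA]; exact h.2.symm
    rw [hdecomp1] at h
    have h1 := fobInv_remove h
    have h2 := fobInv_add h1 (l[j+20])
    have hwin' : ((l.drop (j+1)).take 19 ++ [l[j+20]]) = (l.drop ((i+1-10).toNat)).take 20 := by
      rw [← hdecomp2, show (i+1-10).toNat = j+1 by omega]
    rw [hwin'] at h2
    rw [PySem.List.pyRange_one_cons hlt]
    simp only [List.foldl_cons, fobStepA, fobStepB, hchOut, hchIn, hcpx]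
    cases mb with
    | none =>
      exact ih (i+1) (by omega) (by omega) _ _ h2 (some distinct) i
    | some mo =>
      by_cases hlt2 : distinct < mo
      · simp only [if_pos hlt2]
        exact ih (i+1) (by omega) (by omega) _ _ h2 (some distinct) i
      · simp only [if_neg hlt2]
        exact ih (i+1) (by omega) (by omega) _ _ h2 (some mo) best

theorem fob_toplevel (gs : String) (offset : Int) :
    find_optimal_breakpoint_py gs offset = find_optimal_breakpoint_py_alt gs offset := by
  unfold find_optimal_breakpoint_py find_optimal_breakpoint_py_alt
  set l := gs.toList with hl
  by_cases hn : ((l.length : Int) < 10)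
  · rw [if_pos hn, if_pos hn]
  · rw [if_neg hn, if_neg hn]
    dsimp only
    have hinit0 : fobInv PySem.Dict.empty 0 [] := by
      constructor
      · intro ch; simp [PySem.Dict.getD_empty]
      · rfl
    have hinit := fobInit_inv (l.take 20) _ _ _ hinit0
    rw [List.nil_append] at hinit
    have hslice : PySem.List.slice l none (some 20) = l.take 20 := by
      rw [PySem.List.slice_to l (by norm_num)]
      simp
    rw [hslice]
    by_cases h20 : (l.length : Int) ≤ 20
    · rw [PySem.List.pyRange_one_eq_nil (by omega)]
      simp
    · have hinv : fobInv ((l.take 20).foldl fobInit (PySem.Dict.empty, 0)).1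
          ((l.take 20).foldl fobInit (PySem.Dict.empty, 0)).2
          ((l.drop ((10:Int)-10).toNat).take 20) := by
        simpa using hinit
      have hm := fob_main l ((l.length : Int) - 20).toNat 10 (by norm_num) (by omega) _ _ hinv
        none (PySem.Int.floordiv (l.length : Int) 2)
      have h2 := congrArg Prod.snd hm
      simp only at h2
      rw [h2]

-- ===== VERDICT (by name: the statement is the Claim_ definition above) =====
theorem find_optimal_breakpoint_py_spec : Claim_equal_find_optimal_breakpoint_py := by
  intro gs offset _
  unfold Spec_find_optimal_breakpoint_py
  exact fob_toplevel gs offset
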